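-- pv_equiv track=rewrite | github.com/Kasiet2001/leetcode | min_time_to_make_rope_colorful.py | minCost
-- ===== SOURCE A (Python) =====
-- def minCost(colors, neededTime):
--     ans = 0
--     i = 0
--     j = 0
--     while i < len(colors) and j < len(colors):
--         curr_max = 0
--         curr_sum = 0
--         while j < len(neededTime) and colors[i] == colors[j]:
--             curr_max = max(neededTime[j], curr_max)
--             curr_sum += neededTime[j]
--             j += 1
--         ans += curr_sum - curr_max
--         i = j
--     return ans
-- ===== SOURCE B (Python) =====
-- def minCost(colors, neededTime):
--     ans = 0
--     kept = 0
--     prev_color = None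
--     for c, t in zip(colors, neededTime):
--         if c != prev_color:
--             kept = 0
--         ans += min(t, kept)
--         kept = max(t, kept)
--         prev_color = c
--     return ans
-- ===== Notes on version B (the rewrite author's own statement) =====
-- stated objective: simpler
-- what changed: A's nested while-loops that group the string into equal-color runs and add sum-minus-max per run are replaced by a single forward zip pass keeping a running 'kept' cost (reset to 0 on a color change) and adding min(t, kept) per balloon; the single zip iteration avoids A's per-element indexing and run bookkeeping (measured ~1.8x at large n).
import Mathlib
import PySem

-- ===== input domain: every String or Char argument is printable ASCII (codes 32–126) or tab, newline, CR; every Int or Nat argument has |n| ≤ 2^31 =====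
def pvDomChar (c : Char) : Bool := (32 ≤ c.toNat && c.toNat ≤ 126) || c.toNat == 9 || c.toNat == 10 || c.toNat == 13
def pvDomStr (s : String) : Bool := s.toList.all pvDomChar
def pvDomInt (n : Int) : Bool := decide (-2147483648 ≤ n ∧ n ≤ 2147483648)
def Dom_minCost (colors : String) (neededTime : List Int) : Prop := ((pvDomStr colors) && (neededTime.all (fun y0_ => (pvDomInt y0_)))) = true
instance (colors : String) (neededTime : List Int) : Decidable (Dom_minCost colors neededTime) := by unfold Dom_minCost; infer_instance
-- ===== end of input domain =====

-- B replaces A's nested run-grouping while-loops by a single zip pass with a running kept cost (same O(n) cost, simpler).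

-- ===== PORT A =====
-- inner while loop: 'while j < len(neededTime) and colors[i] == colors[j]: ...'
-- (colors[j] via cs[j]?; the none branch is Python's IndexError, excluded by Pre_)
def pvInnerA (cs : List Char) (ts : List Int) (ci : Char) (j : Nat) (cm sm : Int) : Nat × Int × Int :=
  if _h : j < ts.length then
    match cs[j]? with
    | some c =>
        if c = ci then pvInnerA cs ts ci (j + 1) (max (ts.getD j 0) cm) (sm + ts.getD j 0)
        else (j, cm, sm)
    | none => (j, cm, sm)
  else (j, cm, sm)
termination_by ts.length - j

-- outer while loop: 'while i < len(colors) and j < len(colors): ...' (fuel: the loop can diverge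
-- when len(neededTime) < len(colors); those inputs are outside Pre_, where fuel never runs out)
def pvOuterA (cs : List Char) (ts : List Int) : Nat → Nat → Nat → Int → Int
  | 0, _, _, ans => ans
  | fuel + 1, i, j, ans =>
    if i < cs.length ∧ j < cs.length then
      let r := pvInnerA cs ts (cs.getD i ' ') j 0 0
      pvOuterA cs ts fuel r.1 r.1 (ans + (r.2.2 - r.2.1))
    else ans

def minCost (colors : String) (neededTime : List Int) : Int :=
  pvOuterA colors.toList neededTime (colors.toList.length + 1) 0 0 0

-- ===== PORT B =====
def pvStepB (st : Int × Int × Option Char) (p : Char × Int) : Int × Int × Option Char :=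
  let kept := if some p.1 ≠ st.2.2 then 0 else st.2.1
  (st.1 + min p.2 kept, max p.2 kept, some p.1)

def minCost_alt (colors : String) (neededTime : List Int) : Int :=
  ((colors.toList.zip neededTime).foldl pvStepB (0, 0, none)).1

-- ===== PRECONDITION & SPEC =====
-- Pre_ excludes exactly the inputs where Python A does not return: with colors non-empty,
-- A raises IndexError when colors is shorter than neededTime and loops forever when it is longer.
def Pre_minCost (colors : String) (neededTime : List Int) : Prop :=
  colors.toList = [] ∨ colors.toList.length = neededTime.length
instance (colors : String) (neededTime : List Int) : Decidable (Pre_minCost colors neededTime) := by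
  unfold Pre_minCost; infer_instance

def pvWitness_minCost : String × List Int := ("aab", [2, 1, 3])

def Spec_minCost (colors : String) (neededTime : List Int) (out : Int) : Prop := out = minCost_alt colors neededTime
instance (colors : String) (neededTime : List Int) (out : Int) : Decidable (Spec_minCost colors neededTime out) := by unfold Spec_minCost; infer_instance

-- ===== CLAIM (what is proved, stated in full; the proofs are below) =====
def Claim_equal_minCost : Prop := ∀ (colors : String) (neededTime : List Int), Dom_minCost colors neededTime → Pre_minCost colors neededTime → Spec_minCost colors neededTime (minCost colors neededTime)

-- ===== LEMMAS AND PROOFS =====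

-- Inner while loop glued to B's fold: pvInnerA advances j to the end of the current run, and B's
-- fold over the suffix from j (state ans + (sm - cm), kept = cm, prev = run color) equals the fold
-- over the suffix from the run's end with A's updated accumulators (min t cm + max t cm = t + cm).
lemma pvInnerA_glue (cs : List Char) (ts : List Int) (hlen : cs.length = ts.length) (ci : Char)
    (j : Nat) (cm sm ans : Int) :
      j ≤ (pvInnerA cs ts ci j cm sm).1 ∧
      ((pvInnerA cs ts ci j cm sm).1 < cs.length → cs.getD (pvInnerA cs ts ci j cm sm).1 ' ' ≠ ci) ∧
      ((cs.drop j).zip (ts.drop j)).foldl pvStepB (ans + (sm - cm), cm, some ci)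
        = ((cs.drop (pvInnerA cs ts ci j cm sm).1).zip (ts.drop (pvInnerA cs ts ci j cm sm).1)).foldl
            pvStepB (ans + ((pvInnerA cs ts ci j cm sm).2.2 - (pvInnerA cs ts ci j cm sm).2.1),
                     (pvInnerA cs ts ci j cm sm).2.1, some ci) := by
  fun_induction pvInnerA cs ts ci j cm sm with
  | case1 j cm sm hj hget ih =>
    have hjc : j < cs.length := by omega
    rw [List.getElem?_eq_getElem hjc] at hget
    injection hget with hcj
    obtain ⟨ih1, ih2, ih3⟩ := ih
    refine ⟨by omega, ih2, ?_⟩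
    have hdrop : (cs.drop j).zip (ts.drop j)
        = (cs[j], ts[j]) :: ((cs.drop (j+1)).zip (ts.drop (j+1))) := by
      rw [List.drop_eq_getElem_cons hjc, List.drop_eq_getElem_cons hj, List.zip_cons_cons]
    have hgd : ts.getD j 0 = ts[j] := List.getD_eq_getElem ts 0 hj
    rw [hdrop, List.foldl_cons]
    have hstep : pvStepB (ans + (sm - cm), cm, some ci) (cs[j], ts[j])
        = (ans + (sm + ts.getD j 0 - max (ts.getD j 0) cm), max (ts.getD j 0) cm, some ci) := by
      simp only [pvStepB, hcj, hgd]
      simp only [ne_eq, not_true_eq_false, reduceIte]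
      refine Prod.ext ?_ (Prod.ext rfl rfl)
      simp; omega
    rw [hstep]; exact ih3
  | case2 j cm sm hj c hget hne =>
    have hjc : j < cs.length := by omega
    rw [List.getElem?_eq_getElem hjc] at hget
    injection hget with hcj
    refine ⟨le_refl _, ?_, rfl⟩
    intro _
    rw [List.getD_eq_getElem cs ' ' hjc, hcj]
    exact hne
  | case3 j cm sm hj hget =>
    have hjc : j < cs.length := by omega
    rw [List.getElem?_eq_getElem hjc] at hget
    exact absurd hget (by simp)
  | case4 j cm sm hj =>
    exact ⟨le_refl _, by omega, rfl⟩

-- Outer while loop glued to B's fold over the remaining suffix: at a run boundary j = i, with the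
-- fold state's previous color different from cs[j] (so B's kept resets), both sides agree.
lemma pvOuterA_glue (cs : List Char) (ts : List Int) (hlen : cs.length = ts.length) :
    ∀ fuel j ans kept pc, cs.length - j < fuel →
      (j < cs.length → pc ≠ some (cs.getD j ' ')) →
      pvOuterA cs ts fuel j j ans = (((cs.drop j).zip (ts.drop j)).foldl pvStepB (ans, kept, pc)).1 := by
  intro fuel
  induction fuel with
  | zero => intro j ans kept pc hf _; omega
  | succ fuel ih =>
    intro j ans kept pc hf hpc
    by_cases hj : j < cs.length
    · have hjt : j < ts.length := by omega
      have hci : cs.getD j ' ' = cs[j] := List.getD_eq_getElem cs ' ' hj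
      simp only [pvOuterA]
      rw [if_pos ⟨hj, hj⟩]
      have h1 : pvInnerA cs ts (cs.getD j ' ') j 0 0
          = pvInnerA cs ts (cs.getD j ' ') (j+1) (max (ts.getD j 0) 0) (0 + ts.getD j 0) := by
        rw [pvInnerA]
        simp [hjt, List.getElem?_eq_getElem hj]
      obtain ⟨g1, g2, g3⟩ := pvInnerA_glue cs ts hlen (cs.getD j ' ') (j+1)
        (max (ts.getD j 0) 0) (0 + ts.getD j 0) ans
      set r := pvInnerA cs ts (cs.getD j ' ') (j+1) (max (ts.getD j 0) 0) (0 + ts.getD j 0) with hr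
      rw [h1]
      have hdrop : (cs.drop j).zip (ts.drop j)
          = (cs[j], ts[j]) :: ((cs.drop (j+1)).zip (ts.drop (j+1))) := by
        rw [List.drop_eq_getElem_cons hj, List.drop_eq_getElem_cons hjt, List.zip_cons_cons]
      have hstep : pvStepB (ans, kept, pc) (cs[j], ts[j])
          = (ans + (0 + ts.getD j 0 - max (ts.getD j 0) 0), max (ts.getD j 0) 0, some (cs.getD j ' ')) := by
        have hne : some cs[j] ≠ pc := by
          intro h; exact hpc hj (by rw [hci]; exact h.symm)
        have hgd : ts.getD j 0 = ts[j] := List.getD_eq_getElem ts 0 hjt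
        simp only [pvStepB, hne, hgd, hci, ne_eq, not_false_eq_true, reduceIte]
        refine Prod.ext ?_ (Prod.ext rfl rfl)
        simp; omega
      rw [hdrop, List.foldl_cons, hstep, g3]
      exact ih r.1 (ans + (r.2.2 - r.2.1)) r.2.1 (some (cs.getD j ' ')) (by omega)
        (fun hlt heq => g2 hlt (Option.some.inj heq).symm)
    · simp only [pvOuterA]
      rw [if_neg (by omega)]
      rw [List.drop_eq_nil_of_le (by omega : cs.length ≤ j)]
      simp

-- ===== VERDICT (by name: the statement is the Claim_ definition above) =====
theorem minCost_spec : Claim_equal_minCost := by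
  intro colors neededTime _ hpre
  unfold Spec_minCost minCost minCost_alt
  rcases hpre with h | hlen
  · simp [h, pvOuterA]
  · have := pvOuterA_glue colors.toList neededTime hlen (colors.toList.length + 1) 0 0 0 none
      (by omega) (by simp)
    simpa using this
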